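-- pv_equiv track=rewrite | github.com/grymmjack/DRAW | UTILS/align-qb64pe.py | find_case_colon_pos
-- ===== SOURCE A (Python) =====
-- def find_case_colon_pos(line: str) -> int:
--     """Return the index of ':' in a 'CASE "KEY":' line with inline code, or -1.
--
--     Only matches lines of the form:
--         [whitespace] CASE "STRING_LITERAL" :
--     where there is actual non-comment code following the colon on the same line.
--     """
--     stripped = line.lstrip()
--     if not stripped.upper().startswith('CASE '):
--         return -1
--
--     i = len(line) - len(stripped)  # start of 'CASE'
--     i += 5  # skip 'CASE '
--
--     while i < len(line) and line[i] == ' ':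
--         i += 1
--
--     if i >= len(line) or line[i] != '"':
--         return -1  # not a string-literal CASE
--
--     i += 1  # skip opening "
--     while i < len(line) and line[i] != '"':
--         i += 1
--     if i >= len(line):
--         return -1
--     i += 1  # skip closing "
--
--     while i < len(line) and line[i] == ' ':
--         i += 1
--     if i >= len(line) or line[i] != ':':
--         return -1
--
--     # Require actual code after the colon
--     rest = line[i + 1:].strip()
--     if not rest or rest.startswith("'"):
--         return -1
--
--     return i
-- ===== SOURCE B (Python) =====
-- def find_case_colon_pos(line: str) -> int:
--     """Suffix-peeling rewrite: strip recognised tokens off the front of the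
--     line one after another; the colon position falls out as a length
--     difference, with no index arithmetic."""
--     s = line.lstrip()
--     if s[:5].upper() != 'CASE ':
--         return -1
--     s = s[5:].lstrip(' ')
--     if not s.startswith('"'):
--         return -1
--     q = s[1:].find('"')
--     if q == -1:
--         return -1
--     s = s[q + 2:].lstrip(' ')
--     if not s.startswith(':'):
--         return -1
--     rest = s[1:].strip()
--     if not rest or rest.startswith("'"):
--         return -1
--     return len(line) - len(s)
-- ===== Notes on version B (the rewrite author's own statement) =====
-- stated objective: simpler
-- what changed: A's index-arithmetic scan (three manual while-loops over positions into the original line) is replaced by suffix peeling: strip each recognised token off the front of the line with string operations (lstrip/slice/find/startswith), recovering the colon position as a length difference at the end.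
import Mathlib
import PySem

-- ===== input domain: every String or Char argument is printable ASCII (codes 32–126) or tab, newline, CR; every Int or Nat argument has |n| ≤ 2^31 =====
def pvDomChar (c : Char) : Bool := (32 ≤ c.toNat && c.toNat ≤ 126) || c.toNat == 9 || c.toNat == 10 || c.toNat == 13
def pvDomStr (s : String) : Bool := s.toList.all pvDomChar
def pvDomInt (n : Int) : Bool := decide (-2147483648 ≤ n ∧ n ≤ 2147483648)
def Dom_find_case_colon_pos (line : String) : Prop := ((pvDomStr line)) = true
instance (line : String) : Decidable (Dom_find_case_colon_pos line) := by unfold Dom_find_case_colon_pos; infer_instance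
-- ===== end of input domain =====

-- B rewrites A's index-arithmetic scan as suffix peeling (objective: simpler, same cost).

-- ===== PORT A =====
-- 'while i < len(line) and <pred>(line[i]): i += 1' — the shape of all three of A's scans
def pvWhileIdx (p : Char → Bool) (s : List Char) (i : Nat) : Nat :=
  if h : i < s.length then
    if p s[i] then pvWhileIdx p s (i + 1) else i
  else i
termination_by s.length - i

def find_case_colon_pos (line : String) : Int :=
  let s := line.toList
  let stripped := PySem.Chars.lstrip s
  if ¬ (PySem.Chars.startswith (PySem.Chars.upper stripped) "CASE ".toList = true) then -1
  else
    let i0 := s.length - stripped.length + 5          -- start of 'CASE', then skip 'CASE '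
    let i1 := pvWhileIdx (fun c => c == ' ') s i0
    if s.length ≤ i1 ∨ ¬ (s[i1]? = some '"') then -1  -- not a string-literal CASE
    else
      let i2 := pvWhileIdx (fun c => c != '"') s (i1 + 1)
      if s.length ≤ i2 then -1
      else
        let i3 := i2 + 1                              -- skip closing "
        let i4 := pvWhileIdx (fun c => c == ' ') s i3
        if s.length ≤ i4 ∨ ¬ (s[i4]? = some ':') then -1
        else
          let rest := PySem.Chars.strip (PySem.List.slice s (some ((i4 : Int) + 1)) none)
          if rest = [] ∨ PySem.Chars.startswith rest ['\''] = true then -1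
          else (i4 : Int)

-- ===== PORT B =====
def find_case_colon_pos_alt (line : String) : Int :=
  let s0 := PySem.Chars.lstrip line.toList
  if ¬ (PySem.Chars.upper (PySem.List.slice s0 none (some 5)) = "CASE ".toList) then -1
  else
    -- s[5:].lstrip(' ') : lstrip with an explicit chars argument drops exactly the leading spaces
    let s1 := List.dropWhile (fun c => c == ' ') (PySem.List.slice s0 (some 5) none)
    if ¬ (PySem.Chars.startswith s1 ['"'] = true) then -1
    else
      let q := PySem.Chars.find (PySem.List.slice s1 (some 1) none) ['"']
      if q = -1 then -1
      else
        let s2 := List.dropWhile (fun c => c == ' ') (PySem.List.slice s1 (some (q + 2)) none)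
        if ¬ (PySem.Chars.startswith s2 [':'] = true) then -1
        else
          let rest := PySem.Chars.strip (PySem.List.slice s2 (some 1) none)
          if rest = [] ∨ PySem.Chars.startswith rest ['\''] = true then -1
          else (line.toList.length : Int) - (s2.length : Int)

-- ===== PRECONDITION & SPEC =====
def Spec_find_case_colon_pos (line : String) (out : Int) : Prop := out = find_case_colon_pos_alt line
instance (line : String) (out : Int) : Decidable (Spec_find_case_colon_pos line out) := by unfold Spec_find_case_colon_pos; infer_instance

-- ===== CLAIM (what is proved, stated in full; the proofs are below) =====
def Claim_equal_find_case_colon_pos : Prop := ∀ (line : String), Dom_find_case_colon_pos line → Spec_find_case_colon_pos line (find_case_colon_pos line)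

-- ===== LEMMAS AND PROOFS =====

lemma pv_suffix_drop_eq {u s : List Char} (h : u <:+ s) : s.drop (s.length - u.length) = u := by
  obtain ⟨t, rfl⟩ := h
  simp

lemma pvWhileIdx_eq (p : Char → Bool) (s : List Char) (i : Nat) (hi : i ≤ s.length) :
    pvWhileIdx p s i = s.length - ((s.drop i).dropWhile p).length := by
  fun_induction pvWhileIdx p s i with
  | case1 i h hp ih =>
    have hd : s.drop i = s[i] :: s.drop (i + 1) := List.drop_eq_getElem_cons h
    rw [hd, List.dropWhile_cons_of_pos hp]
    exact ih h
  | case2 i h hp =>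
    have hd : s.drop i = s[i] :: s.drop (i + 1) := List.drop_eq_getElem_cons h
    rw [hd, List.dropWhile_cons_of_neg (by simp [hp])]
    have : (s[i] :: s.drop (i + 1)).length = s.length - i := by
      simp [List.length_drop]
    omega
  | case3 i h =>
    have : i = s.length := by omega
    subst this
    simp

lemma pv_prefix_singleton (c : Char) (l : List Char) : [c] <+: l ↔ l[0]? = some c := by
  cases l with
  | nil => simp
  | cons a t => simp [List.cons_prefix_cons, eq_comm]

lemma pv_mem_iff_singleton_infix (c : Char) (w : List Char) : [c] <:+: w ↔ c ∈ w := by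
  constructor
  · intro h
    exact List.singleton_sublist.mp h.sublist
  · intro h
    obtain ⟨l₁, l₂, rfl⟩ := List.append_of_mem h
    exact ⟨l₁, l₂, by simp⟩

lemma pv_drop_takeWhile_length (p : Char → Bool) (w : List Char) :
    w.drop (w.takeWhile p).length = w.dropWhile p := by
  have h := List.takeWhile_append_dropWhile (p := p) (l := w)
  calc w.drop (w.takeWhile p).length
      = (w.takeWhile p ++ w.dropWhile p).drop (w.takeWhile p).length := by rw [h]
    _ = w.dropWhile p := List.drop_left

lemma pv_getElem?_takeWhile_length (c : Char) (w : List Char) (h : c ∈ w) :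
    w[(w.takeWhile (fun x => x != c)).length]? = some c := by
  induction w with
  | nil => simp at h
  | cons a t ih =>
    by_cases hac : a = c
    · subst hac
      simp
    · have hm : c ∈ t := by
        rcases List.mem_cons.mp h with h1 | h1
        · exact absurd h1.symm hac
        · exact h1
      rw [List.takeWhile_cons_of_pos (by simp [hac])]
      simpa using ih hm

lemma pv_getElem?_lt_takeWhile_length (c : Char) (w : List Char) (j : Nat)
    (hj : j < (w.takeWhile (fun x => x != c)).length) : ¬ w[j]? = some c := by
  have hlen : (w.takeWhile (fun x => x != c)).length ≤ w.length :=
    (List.takeWhile_prefix _).length_le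
  have hjw : j < w.length := lt_of_lt_of_le hj hlen
  have heq : w[j] = (w.takeWhile (fun x => x != c))[j] :=
    ((List.takeWhile_prefix _).getElem hj).symm
  have hmem : (w.takeWhile (fun x => x != c))[j] ∈ w.takeWhile (fun x => x != c) :=
    List.getElem_mem hj
  have hp := List.mem_takeWhile_imp hmem
  simp only [bne_iff_ne, ne_eq] at hp
  rw [List.getElem?_eq_getElem hjw]
  simp only [Option.some.injEq]
  rw [heq]
  exact hp

lemma pv_find_singleton_of_mem (c : Char) (w : List Char) (h : c ∈ w) :
    PySem.Chars.find w [c] = ((w.takeWhile (fun x => x != c)).length : Int) := by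
  have h0 : 0 ≤ PySem.Chars.find w [c] :=
    (PySem.Chars.find_nonneg_iff _ _).mpr ((pv_mem_iff_singleton_infix c w).mpr h)
  obtain ⟨hpre, hmin⟩ := PySem.Chars.find_spec h0
  have hat : [c] <+: w.drop (w.takeWhile (fun x => x != c)).length := by
    rw [pv_prefix_singleton, List.getElem?_drop]
    simpa using pv_getElem?_takeWhile_length c w h
  have h1 : ¬ (PySem.Chars.find w [c]).toNat < (w.takeWhile (fun x => x != c)).length := by
    intro hn
    have hne := pv_getElem?_lt_takeWhile_length c w (PySem.Chars.find w [c]).toNat hn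
    rw [pv_prefix_singleton, List.getElem?_drop] at hpre
    simp at hpre
    exact hne hpre
  have h2 : ¬ (w.takeWhile (fun x => x != c)).length < (PySem.Chars.find w [c]).toNat :=
    fun ht => hmin _ ht hat
  omega

lemma pv_case_check (t : List Char) :
    (PySem.Chars.startswith (PySem.Chars.upper t) "CASE ".toList = true) ↔
    (PySem.Chars.upper (PySem.List.slice t none (some 5)) = "CASE ".toList) := by
  rw [PySem.Chars.startswith_iff, PySem.List.slice_to t (by norm_num)]
  rw [List.prefix_iff_eq_take]
  show "CASE ".toList = List.take ("CASE ".toList.length) (PySem.Chars.upper t) ↔ _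
  have hlen : ("CASE ".toList).length = 5 := by decide
  rw [hlen]
  unfold PySem.Chars.upper
  rw [List.map_take]
  have h5 : ((5:Int).toNat) = 5 := rfl
  rw [h5]
  exact eq_comm

lemma pv_case_len (t : List Char)
    (h : PySem.Chars.startswith (PySem.Chars.upper t) "CASE ".toList = true) : 5 ≤ t.length := by
  rw [PySem.Chars.startswith_iff] at h
  have := h.length_le
  simpa [PySem.Chars.upper] using this

theorem pv_main (line : String) : find_case_colon_pos line = find_case_colon_pos_alt line := by
  simp only [find_case_colon_pos, find_case_colon_pos_alt]
  set s := line.toList with hs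
  set st := PySem.Chars.lstrip s with hstdef
  by_cases hc : PySem.Chars.startswith (PySem.Chars.upper st) "CASE ".toList = true
  case neg =>
    have hc2 : ¬ (PySem.Chars.upper (PySem.List.slice st none (some 5)) = "CASE ".toList) :=
      (not_congr (pv_case_check st)).mp hc
    rw [if_pos hc, if_pos hc2]
  case pos =>
    have hc2 : PySem.Chars.upper (PySem.List.slice st none (some 5)) = "CASE ".toList :=
      (pv_case_check st).mp hc
    rw [if_neg (not_not_intro hc), if_neg (not_not_intro hc2)]
    have hsuf : st <:+ s := List.dropWhile_suffix _
    have hlen5 : 5 ≤ st.length := pv_case_len st hc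
    have hoff : s.length - st.length + 5 ≤ s.length := by
      have := hsuf.length_le; omega
    have hst_drop : s.drop (s.length - st.length) = st := pv_suffix_drop_eq hsuf
    have hdrop_i0 : s.drop (s.length - st.length + 5) = st.drop 5 := by
      have h := List.drop_drop (i := 5) (j := s.length - st.length) (l := s)
      rw [hst_drop] at h
      exact h.symm
    have hslice5 : PySem.List.slice st (some 5) none = st.drop 5 := by
      rw [PySem.List.slice_from st (by norm_num)]
      rfl
    rw [hslice5]
    set u1 := (st.drop 5).dropWhile (fun c => c == ' ') with hu1
    have hi1 : pvWhileIdx (fun c => c == ' ') s (s.length - st.length + 5) = s.length - u1.length := by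
      rw [pvWhileIdx_eq _ _ _ hoff, hdrop_i0]
    rw [hi1]
    have hu1suf : u1 <:+ s :=
      (List.dropWhile_suffix _).trans ((List.drop_suffix 5 st).trans hsuf)
    have hu1L : u1.length ≤ s.length := hu1suf.length_le
    have hdropu1 : s.drop (s.length - u1.length) = u1 := pv_suffix_drop_eq hu1suf
    have hget1 : s[s.length - u1.length]? = u1[0]? := by
      calc s[s.length - u1.length]? = s[(s.length - u1.length) + 0]? := by rw [Nat.add_zero]
        _ = (s.drop (s.length - u1.length))[0]? := List.getElem?_drop.symm
        _ = u1[0]? := by rw [hdropu1]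
    by_cases hq1 : u1[0]? = some '"'
    case neg =>
      have hA : s.length ≤ s.length - u1.length ∨ ¬ (s[s.length - u1.length]? = some '"') :=
        Or.inr (by rw [hget1]; exact hq1)
      have hB : ¬ (PySem.Chars.startswith u1 ['"'] = true) := by
        intro hcontra
        exact hq1 ((pv_prefix_singleton _ _).mp ((PySem.Chars.startswith_iff _ _).mp hcontra))
      rw [if_pos hA, if_pos hB]
    case pos =>
      have hu1ne : u1 ≠ [] := by intro h; rw [h] at hq1; simp at hq1
      have hu1pos : 0 < u1.length := List.length_pos_iff.mpr hu1ne
      have hA : ¬ (s.length ≤ s.length - u1.length ∨ ¬ (s[s.length - u1.length]? = some '"')) := by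
        push Not
        exact ⟨by omega, by rw [hget1]; exact hq1⟩
      have hB : ¬ ¬ (PySem.Chars.startswith u1 ['"'] = true) :=
        not_not_intro (by rw [PySem.Chars.startswith_iff]; exact (pv_prefix_singleton _ _).mpr hq1)
      rw [if_neg hA, if_neg hB]
      obtain ⟨w, hu1w⟩ : ∃ w, u1 = '"' :: w := by
        cases hu : u1 with
        | nil => rw [hu] at hq1; simp at hq1
        | cons a tl =>
          rw [hu] at hq1
          simp at hq1
          exact ⟨tl, by rw [hq1]⟩
      have hslice1 : PySem.List.slice u1 (some 1) none = w := by
        rw [PySem.List.slice_from_one, hu1w]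
        rfl
      rw [hslice1]
      have hi1p1 : (s.length - u1.length) + 1 ≤ s.length := by omega
      have hdropw : s.drop (s.length - u1.length + 1) = w := by
        rw [← List.tail_drop, hdropu1, hu1w]
        rfl
      set w1 := w.dropWhile (fun c => c != '"') with hw1
      have hi2 : pvWhileIdx (fun c => c != '"') s (s.length - u1.length + 1) = s.length - w1.length := by
        rw [pvWhileIdx_eq _ _ _ hi1p1, hdropw]
      rw [hi2]
      have hw1suf : w1 <:+ s := (List.dropWhile_suffix _).trans (hdropw ▸ List.drop_suffix _ _)
      have hw1L : w1.length ≤ s.length := hw1suf.length_le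
      by_cases hmem : '"' ∈ w
      case neg =>
        have hw1nil : w1 = [] := by
          rw [hw1, List.dropWhile_eq_nil_iff]
          intro x hx
          simp only [bne_iff_ne, ne_eq]
          exact fun he => hmem (he ▸ hx)
        have hA2 : s.length ≤ s.length - w1.length := by rw [hw1nil]; simp
        have hB2 : PySem.Chars.find w ['"'] = -1 :=
          (PySem.Chars.find_eq_neg_one_iff _ _).mpr
            (fun hinf => hmem ((pv_mem_iff_singleton_infix _ _).mp hinf))
        rw [if_pos hA2, if_pos hB2]
      case pos =>
        have hfind : PySem.Chars.find w ['"'] = ((w.takeWhile (fun x => x != '"')).length : Int) :=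
          pv_find_singleton_of_mem _ _ hmem
        have hw1ne : w1 ≠ [] := by
          rw [hw1]
          intro hnil
          rw [List.dropWhile_eq_nil_iff] at hnil
          have := hnil '"' hmem
          simp at this
        have hw1pos : 0 < w1.length := List.length_pos_iff.mpr hw1ne
        have hA2 : ¬ (s.length ≤ s.length - w1.length) := by omega
        have hB2 : ¬ (PySem.Chars.find w ['"'] = -1) := by
          rw [hfind]
          intro h
          omega
        rw [if_neg hA2, if_neg hB2]
        have hdw : w.drop (w.takeWhile (fun x => x != '"')).length = w1 := by
          rw [hw1]
          exact pv_drop_takeWhile_length _ w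
        have hslice2 : PySem.List.slice u1 (some (PySem.Chars.find w ['"'] + 2)) none = w1.tail := by
          rw [hfind]
          rw [PySem.List.slice_from u1 (by positivity)]
          have htn : (((w.takeWhile (fun x => x != '"')).length : Int) + 2).toNat
              = (w.takeWhile (fun x => x != '"')).length + 2 := by omega
          rw [htn, hu1w]
          show w.drop ((w.takeWhile (fun x => x != '"')).length + 1) = w1.tail
          rw [← List.tail_drop, hdw]
        rw [hslice2]
        have hi2p1 : (s.length - w1.length) + 1 ≤ s.length := by omega
        have hdropw1 : s.drop (s.length - w1.length) = w1 := pv_suffix_drop_eq hw1suf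
        have hdropw1t : s.drop (s.length - w1.length + 1) = w1.tail := by
          rw [← List.tail_drop, hdropw1]
        set v := (w1.tail).dropWhile (fun c => c == ' ') with hv
        have hi4 : pvWhileIdx (fun c => c == ' ') s (s.length - w1.length + 1) = s.length - v.length := by
          rw [pvWhileIdx_eq _ _ _ hi2p1, hdropw1t]
        rw [hi4]
        have hvsuf : v <:+ s := (List.dropWhile_suffix _).trans (hdropw1t ▸ List.drop_suffix _ _)
        have hvL : v.length ≤ s.length := hvsuf.length_le
        have hdropv : s.drop (s.length - v.length) = v := pv_suffix_drop_eq hvsuf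
        have hget2 : s[s.length - v.length]? = v[0]? := by
          calc s[s.length - v.length]? = s[(s.length - v.length) + 0]? := by rw [Nat.add_zero]
            _ = (s.drop (s.length - v.length))[0]? := List.getElem?_drop.symm
            _ = v[0]? := by rw [hdropv]
        by_cases hq2 : v[0]? = some ':'
        case neg =>
          have hA3 : s.length ≤ s.length - v.length ∨ ¬ (s[s.length - v.length]? = some ':') :=
            Or.inr (by rw [hget2]; exact hq2)
          have hB3 : ¬ (PySem.Chars.startswith v [':'] = true) := by
            intro hcontra
            exact hq2 ((pv_prefix_singleton _ _).mp ((PySem.Chars.startswith_iff _ _).mp hcontra))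
          rw [if_pos hA3, if_pos hB3]
        case pos =>
          have hvne : v ≠ [] := by intro h; rw [h] at hq2; simp at hq2
          have hvpos : 0 < v.length := List.length_pos_iff.mpr hvne
          have hA3 : ¬ (s.length ≤ s.length - v.length ∨ ¬ (s[s.length - v.length]? = some ':')) := by
            push Not
            exact ⟨by omega, by rw [hget2]; exact hq2⟩
          have hB3 : ¬ ¬ (PySem.Chars.startswith v [':'] = true) :=
            not_not_intro (by rw [PySem.Chars.startswith_iff]; exact (pv_prefix_singleton _ _).mpr hq2)
          rw [if_neg hA3, if_neg hB3]
          have hsliceA : PySem.List.slice s (some (((s.length - v.length : Nat) : Int) + 1)) none = v.tail := by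
            rw [PySem.List.slice_from s (by positivity)]
            have htn : (((s.length - v.length : Nat) : Int) + 1).toNat = s.length - v.length + 1 := by omega
            rw [htn, ← List.tail_drop, hdropv]
          have hsliceB : PySem.List.slice v (some 1) none = v.tail := PySem.List.slice_from_one v
          rw [hsliceA, hsliceB]
          by_cases hr : PySem.Chars.strip v.tail = [] ∨ PySem.Chars.startswith (PySem.Chars.strip v.tail) ['\''] = true
          · rw [if_pos hr, if_pos hr]
          · rw [if_neg hr, if_neg hr]
            omega

-- ===== VERDICT (by name: the statement is the Claim_ definition above) =====
theorem find_case_colon_pos_spec : Claim_equal_find_case_colon_pos := by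
  intro line _
  unfold Spec_find_case_colon_pos
  exact pv_main line
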